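-- pv_equiv track=rewrite | github.com/maralb99/syntax-parsing-icl-romance-langs | constrained_decoding_parser.py | find_best_root
-- ===== SOURCE A (Python) =====
-- def find_best_root(pos_tags):
--     for i, pos in enumerate(pos_tags):
--         if pos == "VERB":
--             return i
--
--     for i, pos in enumerate(pos_tags):
--         if pos == "AUX":
--             return i
--
--     for i, pos in enumerate(pos_tags):
--         if pos in ["NOUN", "PROPN"]:
--             return i
--
--     for i, pos in enumerate(pos_tags):
--         if pos in ["ADJ", "ADV", "PRON", "NUM"]:
--             return i
--
--     for i, pos in enumerate(pos_tags):
--         if pos != "PUNCT":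
--             return i
--
--     return 0
-- ===== SOURCE B (Python) =====
-- def find_best_root(pos_tags):
--     def prio(pos):
--         if pos == "PUNCT":
--             return None
--         if pos == "VERB":
--             return 1
--         if pos == "AUX":
--             return 2
--         if pos in ("NOUN", "PROPN"):
--             return 3
--         if pos in ("ADJ", "ADV", "PRON", "NUM"):
--             return 4
--         return 5
--     best = None  # (priority, index); earliest index of smallest priority wins
--     for i, pos in enumerate(pos_tags):
--         p = prio(pos)
--         if p is None:
--             continue
--         if best is None or p < best[0]:
--             best = (p, i)
--     return best[1] if best is not None else 0
-- ===== Notes on version B (the rewrite author's own statement) =====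
-- stated objective: simpler
-- what changed: Replaces A's five sequential scans of the list (one per POS priority class) with a single pass that maps each tag to a numeric priority and keeps the best (priority, index) pair, updating only on strictly smaller priority.
import Mathlib
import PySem

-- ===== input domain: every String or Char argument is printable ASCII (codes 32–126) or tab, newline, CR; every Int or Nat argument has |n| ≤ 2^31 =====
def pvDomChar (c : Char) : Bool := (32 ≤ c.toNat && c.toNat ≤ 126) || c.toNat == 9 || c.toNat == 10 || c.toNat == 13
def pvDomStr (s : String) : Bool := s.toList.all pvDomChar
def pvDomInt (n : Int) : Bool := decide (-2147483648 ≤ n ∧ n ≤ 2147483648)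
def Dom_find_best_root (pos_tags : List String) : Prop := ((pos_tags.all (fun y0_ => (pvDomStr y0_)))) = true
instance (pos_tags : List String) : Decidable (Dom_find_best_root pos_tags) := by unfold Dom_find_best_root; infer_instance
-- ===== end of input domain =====

-- B replaces A's five sequential scans with one priority-ranked pass; objective: simpler.


-- ===== PORT A =====
-- one 'for i, pos in enumerate(...)' loop with early return: first index satisfying f
def findTag (f : String → Bool) : List String → Int → Option Int
  | [], _ => none
  | x :: xs, i => if f x then some i else findTag f xs (i + 1)

def find_best_root (pos_tags : List String) : Int :=
  match findTag (fun p => p = "VERB") pos_tags 0 with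
  | some i => i
  | none =>
    match findTag (fun p => p = "AUX") pos_tags 0 with
    | some i => i
    | none =>
      match findTag (fun p => p = "NOUN" ∨ p = "PROPN") pos_tags 0 with
      | some i => i
      | none =>
        match findTag (fun p => p = "ADJ" ∨ p = "ADV" ∨ p = "PRON" ∨ p = "NUM") pos_tags 0 with
        | some i => i
        | none =>
          match findTag (fun p => ¬ (p = "PUNCT")) pos_tags 0 with
          | some i => i
          | none => 0

-- ===== PORT B =====
-- prio(pos) of Source B: None for PUNCT, else 1..5
def prioB (s : String) : Option Int :=
  if s = "PUNCT" then none
  else if s = "VERB" then some 1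
  else if s = "AUX" then some 2
  else if s = "NOUN" ∨ s = "PROPN" then some 3
  else if s = "ADJ" ∨ s = "ADV" ∨ s = "PRON" ∨ s = "NUM" then some 4
  else some 5

-- one iteration of Source B's loop body
def stepB (best : Option (Int × Int)) (i : Int) (pos : String) : Option (Int × Int) :=
  match prioB pos with
  | none => best
  | some p =>
    match best with
    | none => some (p, i)
    | some (bp, bi) => if p < bp then some (p, i) else some (bp, bi)

-- the 'for i, pos in enumerate(pos_tags)' loop carrying 'best'
def scanB : List String → Int → Option (Int × Int) → Option (Int × Int)
  | [], _, best => best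
  | x :: xs, i, best => scanB xs (i + 1) (stepB best i x)

def find_best_root_alt (pos_tags : List String) : Int :=
  match scanB pos_tags 0 none with
  | some (_, bi) => bi
  | none => 0

-- ===== PRECONDITION & SPEC =====
def Spec_find_best_root (pos_tags : List String) (out : Int) : Prop := out = find_best_root_alt pos_tags
instance (pos_tags : List String) (out : Int) : Decidable (Spec_find_best_root pos_tags out) := by unfold Spec_find_best_root; infer_instance

-- ===== CLAIM (what is proved, stated in full; the proofs are below) =====
def Claim_equal_find_best_root : Prop := ∀ (pos_tags : List String), Dom_find_best_root pos_tags → Spec_find_best_root pos_tags (find_best_root pos_tags)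

-- ===== LEMMAS AND PROOFS =====

-- left-biased "min by priority" merge of two optional candidates
def combB (a b : Option (Int × Int)) : Option (Int × Int) :=
  match a, b with
  | a, none => a
  | none, b => b
  | some (p, i), some (q, j) => if q < p then some (q, j) else some (p, i)

lemma combB_none_left (b : Option (Int × Int)) : combB none b = b := by
  cases b with
  | none => rfl
  | some x => cases x; rfl

lemma combB_assoc (a b c : Option (Int × Int)) :
    combB (combB a b) c = combB a (combB b c) := by
  rcases a with _ | ⟨p, i⟩ <;> rcases b with _ | ⟨q, j⟩ <;> rcases c with _ | ⟨r, k⟩ <;>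
    simp only [combB] <;> split_ifs <;>
    first
      | rfl
      | (exfalso; omega)
      | (simp only [combB] <;> split_ifs <;> first | rfl | (exfalso; omega))

lemma stepB_eq_combB (b : Option (Int × Int)) (i : Int) (x : String) :
    stepB b i x = combB b ((prioB x).map (fun p => (p, i))) := by
  rcases h : prioB x with _ | p <;> rcases b with _ | ⟨bp, bi⟩ <;> simp [stepB, combB, h]

lemma scanB_combB (xs : List String) : ∀ (i : Int) (b : Option (Int × Int)),
    scanB xs i b = combB b (scanB xs i none) := by
  induction xs with
  | nil => intro i b; cases b with
    | none => rfl
    | some x => cases x; rfl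
  | cons x xs ih =>
    intro i b
    simp only [scanB]
    rw [stepB_eq_combB, stepB_eq_combB, combB_none_left, ih (i+1) (combB b _),
        ih (i+1) ((prioB x).map _), combB_assoc]

lemma prioB_bounds (s : String) (p : Int) (h : prioB s = some p) : 1 ≤ p ∧ p ≤ 5 := by
  unfold prioB at h
  split_ifs at h <;> simp_all <;> omega

lemma scanB_none_bounds (xs : List String) : ∀ (i p : Int) (j : Int),
    scanB xs i none = some (p, j) → 1 ≤ p ∧ p ≤ 5 := by
  induction xs with
  | nil => intro i p j h; simp [scanB] at h
  | cons x xs ih =>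
    intro i p j h
    simp only [scanB] at h
    rw [scanB_combB, stepB_eq_combB, combB_none_left] at h
    rcases hx : prioB x with _ | q <;> rw [hx] at h
    · exact ih _ _ _ (by simpa [combB_none_left] using h)
    · rcases hr : scanB xs (i+1) none with _ | ⟨r, k⟩ <;> rw [hr] at h
      · simp only [combB, Option.map_some, Option.some.injEq, Prod.mk.injEq] at h
        exact h.1 ▸ prioB_bounds x q hx
      · simp only [combB, Option.map_some] at h
        split_ifs at h with hlt <;>
          simp only [Option.some.injEq, Prod.mk.injEq] at h
        · exact h.1 ▸ ih _ _ _ hr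
        · exact h.1 ▸ prioB_bounds x q hx

-- findTag is none iff its predicate fails everywhere
lemma findTag_eq_none (f : String → Bool) (xs : List String) : ∀ i : Int,
    (∀ s ∈ xs, f s = false) → findTag f xs i = none := by
  induction xs with
  | nil => intro i _; rfl
  | cons x xs ih =>
    intro i h
    simp only [findTag, h x (by simp)]
    simpa using ih (i+1) (fun s hs => h s (by simp [hs]))

-- if scan finds nothing, every tag is PUNCT
lemma scanB_none_all_punct (xs : List String) : ∀ i : Int,
    scanB xs i none = none → ∀ s ∈ xs, s = "PUNCT" := by
  induction xs with
  | nil => intro i _ s hs; simp at hs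
  | cons x xs ih =>
    intro i h s hs
    simp only [scanB] at h
    rw [scanB_combB, stepB_eq_combB, combB_none_left] at h
    rcases hx : prioB x with _ | q <;> rw [hx] at h
    · have hxP : x = "PUNCT" := by
        by_contra hne
        simp [prioB, hne] at hx
        split_ifs at hx <;> simp at hx
      rcases List.mem_cons.mp hs with rfl | hs
      · exact hxP
      · exact ih (i+1) (by simpa [combB_none_left] using h) s hs
    · exfalso
      rcases hr : scanB xs (i+1) none with _ | ⟨r, k⟩ <;> rw [hr] at h <;>
        simp [combB] at h
      split_ifs at h <;> simp at h

-- the predicate "prioB s = some q" as a Bool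
def clsq (q : Int) (s : String) : Bool := prioB s = some q

-- main characterisation: what scanB's result says about each findTag level
lemma scanB_char (xs : List String) : ∀ (i p j : Int),
    scanB xs i none = some (p, j) →
    findTag (clsq p) xs i = some j ∧ ∀ q, q < p → findTag (clsq q) xs i = none := by
  induction xs with
  | nil => intro i p j h; simp [scanB] at h
  | cons x xs ih =>
    intro i p j h
    simp only [scanB] at h
    rw [scanB_combB, stepB_eq_combB, combB_none_left] at h
    rcases hx : prioB x with _ | a <;> rw [hx] at h
    · -- x is PUNCT: clsq q x = false for all q
      have hxf : ∀ q, clsq q x = false := by intro q; simp [clsq, hx]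
      have := ih (i+1) p j (by simpa [combB_none_left] using h)
      refine ⟨?_, fun q hq => ?_⟩
      · simp [findTag, hxf p]; exact this.1
      · simp [findTag, hxf q]; exact this.2 q hq
    · have hxa : clsq a x = true := by simp [clsq, hx]
      have hxne : ∀ q, q ≠ a → clsq q x = false := by
        intro q hq; simp [clsq, hx]; omega
      rcases hr : scanB xs (i+1) none with _ | ⟨r, k⟩ <;> rw [hr] at h
      · -- rest empty of candidates: result is (a, i)
        simp [combB] at h
        obtain ⟨rfl, rfl⟩ := h
        have hall : ∀ s ∈ xs, s = "PUNCT" := scanB_none_all_punct xs (i+1) hr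
        refine ⟨by simp [findTag, hxa], fun q hq => ?_⟩
        have : ∀ s ∈ xs, clsq q s = false := by
          intro s hs; simp [clsq, hall s hs, prioB]
        simp [findTag, hxne q (by omega)]
        exact findTag_eq_none _ xs (i+1) this
      · simp [combB] at h
        have hrk := ih (i+1) r k hr
        split_ifs at h with hlt
        · -- rest wins: r < a
          obtain ⟨rfl, rfl⟩ := h
          refine ⟨?_, fun q hq => ?_⟩
          · simp [findTag, hxne p (by omega)]; exact hrk.1
          · simp [findTag, hxne q (by omega)]; exact hrk.2 q hq
        · -- head wins: a ≤ r
          obtain ⟨rfl, rfl⟩ := h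
          refine ⟨by simp [findTag, hxa], fun q hq => ?_⟩
          simp [findTag, hxne q (by omega)]
          exact hrk.2 q (by omega)

-- findTag only depends on the predicate's values on the list
lemma findTag_congr_mem (f g : String → Bool) (xs : List String)
    (h : ∀ s ∈ xs, f s = g s) : ∀ i : Int, findTag f xs i = findTag g xs i := by
  induction xs with
  | nil => intro i; rfl
  | cons x xs ih =>
    intro i
    simp only [findTag, h x (by simp)]
    split
    · rfl
    · exact ih (fun s hs => h s (by simp [hs])) (i+1)

-- A's level predicates agree with clsq 1..4
lemma cls1_eq (s : String) : clsq 1 s = decide (s = "VERB") := by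
  simp only [clsq, prioB]; split_ifs <;> simp_all
lemma cls2_eq (s : String) : clsq 2 s = decide (s = "AUX") := by
  simp only [clsq, prioB]; split_ifs <;> simp_all
lemma cls3_eq (s : String) : clsq 3 s = decide (s = "NOUN" ∨ s = "PROPN") := by
  simp only [clsq, prioB]; split_ifs <;> simp_all
lemma cls4_eq (s : String) : clsq 4 s = decide (s = "ADJ" ∨ s = "ADV" ∨ s = "PRON" ∨ s = "NUM") := by
  simp only [clsq, prioB]; split_ifs <;> simp_all
  rcases ‹s = "NOUN" ∨ s = "PROPN"› with rfl | rfl <;> decide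

-- if a tag has no priority 1..4, being prio-5 is the same as being non-PUNCT
lemma cls5_eq_of_hi (s : String)
    (h1 : clsq 1 s = false) (h2 : clsq 2 s = false) (h3 : clsq 3 s = false)
    (h4 : clsq 4 s = false) : clsq 5 s = decide (¬ (s = "PUNCT")) := by
  simp only [clsq, prioB] at *
  split_ifs at * <;> simp_all

-- converse of findTag_eq_none
lemma findTag_none_all (f : String → Bool) (xs : List String) : ∀ i : Int,
    findTag f xs i = none → ∀ s ∈ xs, f s = false := by
  induction xs with
  | nil => intro i _ s hs; simp at hs
  | cons x xs ih =>
    intro i h s hs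
    simp only [findTag] at h
    by_cases hx : f x = true
    · simp [hx] at h
    · rcases List.mem_cons.mp hs with rfl | hs
      · simpa using hx
      · exact ih (i+1) (by simpa [hx] using h) s hs

theorem find_best_root_spec_aux (pos_tags : List String) :
    find_best_root pos_tags = find_best_root_alt pos_tags := by
  unfold find_best_root find_best_root_alt
  rcases h : scanB pos_tags 0 none with _ | ⟨p, j⟩
  · -- all PUNCT: every findTag is none, both return 0
    have hall := scanB_none_all_punct pos_tags 0 h
    rw [findTag_eq_none _ _ _ (fun s hs => by simp [hall s hs]),
        findTag_eq_none _ _ _ (fun s hs => by simp [hall s hs]),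
        findTag_eq_none _ _ _ (fun s hs => by simp [hall s hs]),
        findTag_eq_none _ _ _ (fun s hs => by simp [hall s hs]),
        findTag_eq_none _ _ _ (fun s hs => by simp [hall s hs])]
  · obtain ⟨hp1, hp5⟩ := scanB_none_bounds pos_tags 0 p j h
    obtain ⟨hfind, hnone⟩ := scanB_char pos_tags 0 p j h
    have e1 := findTag_congr_mem (clsq 1) (fun s => decide (s = "VERB")) pos_tags
      (fun s _ => cls1_eq s) 0
    have e2 := findTag_congr_mem (clsq 2) (fun s => decide (s = "AUX")) pos_tags
      (fun s _ => cls2_eq s) 0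
    have e3 := findTag_congr_mem (clsq 3) (fun s => decide (s = "NOUN" ∨ s = "PROPN")) pos_tags
      (fun s _ => cls3_eq s) 0
    have e4 := findTag_congr_mem (clsq 4)
      (fun s => decide (s = "ADJ" ∨ s = "ADV" ∨ s = "PRON" ∨ s = "NUM")) pos_tags
      (fun s _ => cls4_eq s) 0
    interval_cases p
    · rw [← e1, hfind]
    · rw [← e1, hnone 1 (by omega), ← e2, hfind]
    · rw [← e1, hnone 1 (by omega), ← e2, hnone 2 (by omega), ← e3, hfind]
    · rw [← e1, hnone 1 (by omega), ← e2, hnone 2 (by omega), ← e3, hnone 3 (by omega),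
          ← e4, hfind]
    · -- p = 5: levels 1..4 empty, so non-PUNCT coincides with prio 5
      have n1 := hnone 1 (by omega); have n2 := hnone 2 (by omega)
      have n3 := hnone 3 (by omega); have n4 := hnone 4 (by omega)
      have c1 := findTag_none_all _ _ _ n1
      have c2 := findTag_none_all _ _ _ n2
      have c3 := findTag_none_all _ _ _ n3
      have c4 := findTag_none_all _ _ _ n4
      have e5 : findTag (clsq 5) pos_tags 0
          = findTag (fun p => ¬ (p = "PUNCT")) pos_tags 0 :=
        findTag_congr_mem _ _ pos_tags
          (fun s hs => cls5_eq_of_hi s (c1 s hs) (c2 s hs) (c3 s hs) (c4 s hs)) 0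
      rw [← e1, n1, ← e2, n2, ← e3, n3, ← e4, n4, ← e5, hfind]

-- ===== VERDICT (by name: the statement is the Claim_ definition above) =====
theorem find_best_root_spec : Claim_equal_find_best_root := by
  intro pos_tags _
  exact find_best_root_spec_aux pos_tags
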